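-- pv_equiv track=rewrite | github.com/dvnuo/engineering-flow-platform-opencode-runtime | efp_opencode_adapter/permission_generator.py | _portal_seed_aliases_for_tool
-- ===== SOURCE A (Python) =====
-- from typing import Any
--
-- READ_TAGS = {"read_only", "read"}
--
-- def _portal_seed_aliases_for_tool(tool: dict[str, Any], tags: set[str], systems: set[str]) -> set[str]:
--     aliases: set[str] = set()
--     if "jira" in systems:
--         if tags & READ_TAGS:
--             aliases.update({
--                 "adapter:jira:read_issue",
--                 "adapter:jira:search_issue",
--                 "adapter:jira:search_issues",
--                 "read_issue",
--                 "search_issue",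
--                 "search_issues",
--             })
--         if "comment" in tags:
--             aliases.update({"adapter:jira:add_comment", "add_comment"})
--         if "transition" in tags:
--             aliases.update({"adapter:jira:transition_issue", "transition_issue"})
--         if "assign" in tags:
--             aliases.update({"adapter:jira:assign_issue", "assign_issue"})
--         if "update" in tags:
--             aliases.update({"adapter:jira:update_issue", "update_issue"})
--     return {a.lower() for a in aliases if a}
-- ===== SOURCE B (Python) =====
-- # B: one pass over tags classifying each tag through a lookup dict into a canonical
-- # action group key, then a pass over the ordered key->actions groups deriving the
-- # "adapter:jira:" aliases by concatenation (no hard-coded prefixed strings, no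
-- # lowercase/empty normalization: every generated alias is already lowercase & nonempty).
--
-- _TAG_KEY = {
--     "read_only": "read",
--     "read": "read",
--     "comment": "comment",
--     "transition": "transition",
--     "assign": "assign",
--     "update": "update",
-- }
--
-- _KEY_ACTIONS = [
--     ("read", ["read_issue", "search_issue", "search_issues"]),
--     ("comment", ["add_comment"]),
--     ("transition", ["transition_issue"]),
--     ("assign", ["assign_issue"]),
--     ("update", ["update_issue"]),
-- ]
--
-- def _portal_seed_aliases_for_tool(tool, tags, systems):
--     if "jira" not in systems:
--         return set()
--     keys = {_TAG_KEY[t] for t in tags if t in _TAG_KEY}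
--     aliases: set = set()
--     for key, actions in _KEY_ACTIONS:
--         if key in keys:
--             for act in actions:
--                 aliases.add("adapter:jira:" + act)
--             aliases.update(actions)
--     return aliases
-- ===== Notes on version B (the rewrite author's own statement) =====
-- stated objective: alternative
-- what changed: Instead of five hard-coded branch tests with all 16 alias strings enumerated and a final lowercase/nonempty normalization, B classifies each tag once through a lookup dict into canonical action-group keys, then walks the ordered key->actions groups deriving the adapter-prefixed aliases by string concatenation, with no normalization pass.
import Mathlib
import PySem

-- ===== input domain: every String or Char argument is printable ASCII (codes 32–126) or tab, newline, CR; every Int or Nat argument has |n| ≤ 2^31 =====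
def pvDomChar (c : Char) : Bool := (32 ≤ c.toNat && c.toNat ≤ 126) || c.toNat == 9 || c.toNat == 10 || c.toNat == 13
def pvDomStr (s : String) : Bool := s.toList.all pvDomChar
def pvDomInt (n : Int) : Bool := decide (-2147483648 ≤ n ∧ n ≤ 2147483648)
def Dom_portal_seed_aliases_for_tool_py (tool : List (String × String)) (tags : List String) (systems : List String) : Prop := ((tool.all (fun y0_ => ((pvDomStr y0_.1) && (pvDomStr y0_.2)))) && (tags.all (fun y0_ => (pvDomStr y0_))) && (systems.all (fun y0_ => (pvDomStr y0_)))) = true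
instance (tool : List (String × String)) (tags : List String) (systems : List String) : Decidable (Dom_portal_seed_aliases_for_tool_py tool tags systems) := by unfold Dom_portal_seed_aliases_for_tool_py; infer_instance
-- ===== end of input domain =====

-- B classifies each tag once through a lookup dict into canonical group keys and derives the
-- "adapter:jira:" aliases by concatenation instead of A's five hard-coded branch/intersection
-- tests over enumerated alias literals (objective: alternative decomposition, same cost).


-- ===== PORT A =====
def READ_TAGS_py : PySem.Set String := PySem.Set.ofList ["read_only", "read"]

def portal_seed_aliases_for_tool_py (tool : List (String × String)) (tags : List String) (systems : List String) : List String :=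
  let aliases : PySem.Set String := PySem.Set.empty
  let aliases :=
    if PySem.Set.contains systems "jira" then
      let aliases :=
        if PySem.Set.inter tags READ_TAGS_py ≠ [] then
          PySem.Set.update aliases ["adapter:jira:read_issue", "adapter:jira:search_issue",
            "adapter:jira:search_issues", "read_issue", "search_issue", "search_issues"]
        else aliases
      let aliases :=
        if PySem.Set.contains tags "comment" then
          PySem.Set.update aliases ["adapter:jira:add_comment", "add_comment"]
        else aliases
      let aliases :=
        if PySem.Set.contains tags "transition" then
          PySem.Set.update aliases ["adapter:jira:transition_issue", "transition_issue"]
        else aliases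
      let aliases :=
        if PySem.Set.contains tags "assign" then
          PySem.Set.update aliases ["adapter:jira:assign_issue", "assign_issue"]
        else aliases
      let aliases :=
        if PySem.Set.contains tags "update" then
          PySem.Set.update aliases ["adapter:jira:update_issue", "update_issue"]
        else aliases
      aliases
    else aliases
  -- {a.lower() for a in aliases if a}
  PySem.Set.ofList ((aliases.filter (fun a => a ≠ "")).map PySem.Str.lower)

-- ===== PORT B =====
def TAG_KEY_py : PySem.Dict String String :=
  PySem.Dict.ofList [("read_only", "read"), ("read", "read"), ("comment", "comment"),
    ("transition", "transition"), ("assign", "assign"), ("update", "update")]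

def KEY_ACTIONS_py : List (String × List String) :=
  [ ("read", ["read_issue", "search_issue", "search_issues"]),
    ("comment", ["add_comment"]),
    ("transition", ["transition_issue"]),
    ("assign", ["assign_issue"]),
    ("update", ["update_issue"]) ]

def portal_seed_aliases_for_tool_py_alt (tool : List (String × String)) (tags : List String) (systems : List String) : List String :=
  if ¬ PySem.Set.contains systems "jira" then
    PySem.Set.empty
  else
    -- keys = {_TAG_KEY[t] for t in tags if t in _TAG_KEY}
    let keys : PySem.Set String := tags.foldl (fun s t =>
      match PySem.Dict.get? TAG_KEY_py t with
      | some k => PySem.Set.add s k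
      | none => s) PySem.Set.empty
    -- for key, actions in _KEY_ACTIONS: if key in keys: add prefixed, then update(actions)
    KEY_ACTIONS_py.foldl (fun aliases ka =>
      if PySem.Set.contains keys ka.1 then
        PySem.Set.update
          (ka.2.foldl (fun a act => PySem.Set.add a ("adapter:jira:" ++ act)) aliases)
          ka.2
      else aliases) PySem.Set.empty

-- ===== PRECONDITION & SPEC =====
def Spec_portal_seed_aliases_for_tool_py (tool : List (String × String)) (tags : List String) (systems : List String) (out : List String) : Prop := out = portal_seed_aliases_for_tool_py_alt tool tags systems
instance (tool : List (String × String)) (tags : List String) (systems : List String) (out : List String) : Decidable (Spec_portal_seed_aliases_for_tool_py tool tags systems out) := by unfold Spec_portal_seed_aliases_for_tool_py; infer_instance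

-- ===== CLAIM (what is proved, stated in full; the proofs are below) =====
def Claim_equal_portal_seed_aliases_for_tool_py : Prop := ∀ (tool : List (String × String)) (tags : List String) (systems : List String), Dom_portal_seed_aliases_for_tool_py tool tags systems → Spec_portal_seed_aliases_for_tool_py tool tags systems (portal_seed_aliases_for_tool_py tool tags systems)

-- ===== LEMMAS AND PROOFS =====
-- membership in B's keys set: some tag of `tags` maps to k in the lookup dict
theorem mem_keysfold (tags : List String) (init : PySem.Set String) (k : String) :
    k ∈ (tags.foldl (fun s t =>
        match PySem.Dict.get? TAG_KEY_py t with
        | some k' => PySem.Set.add s k'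
        | none => s) init)
    ↔ (k ∈ init ∨ ∃ t ∈ tags, PySem.Dict.get? TAG_KEY_py t = some k) := by
  induction tags generalizing init with
  | nil => simp
  | cons t ts ih =>
    simp only [List.foldl_cons]
    cases h : PySem.Dict.get? TAG_KEY_py t with
    | none => rw [ih]; simp [h]
    | some k' =>
      rw [ih]
      simp only [PySem.Set.mem_add, List.mem_cons, or_assoc]
      constructor
      · rintro (hi | hk | ⟨u, hu, hg⟩)
        · exact Or.inl hi
        · exact Or.inr ⟨t, Or.inl rfl, hk ▸ h⟩
        · exact Or.inr ⟨u, Or.inr hu, hg⟩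
      · rintro (hi | ⟨u, (rfl | hu), hg⟩)
        · exact Or.inl hi
        · rw [h] at hg; exact Or.inr (Or.inl (Option.some_injective _ hg).symm)
        · exact Or.inr (Or.inr ⟨u, hu, hg⟩)

-- explicit characterization of the lookup dict
theorem getkey_char (t : String) (k : String) :
    PySem.Dict.get? TAG_KEY_py t = some k ↔
      ((t = "read_only" ∨ t = "read") ∧ k = "read") ∨
      (t = "comment" ∧ k = "comment") ∨ (t = "transition" ∧ k = "transition") ∨
      (t = "assign" ∧ k = "assign") ∨ (t = "update" ∧ k = "update") := by
  have hT : TAG_KEY_py = PySem.Dict.mk [("read_only", "read"), ("read", "read"),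
      ("comment", "comment"), ("transition", "transition"), ("assign", "assign"),
      ("update", "update")] := by decide
  rw [hT]
  by_cases h1 : t = "read_only" <;> by_cases h2 : t = "read" <;>
  by_cases h3 : t = "comment" <;> by_cases h4 : t = "transition" <;>
  by_cases h5 : t = "assign" <;> by_cases h6 : t = "update" <;>
    simp_all [PySem.Dict.get?_mk_cons, PySem.Dict.get?] <;> tauto

-- A's "tags & READ_TAGS" test as a plain membership disjunction
theorem inter_read (tags : List String) :
    (PySem.Set.inter tags (PySem.Set.ofList ["read_only", "read"]) ≠ []) ↔
      ("read_only" ∈ tags ∨ "read" ∈ tags) := by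
  simp [PySem.Set.inter, PySem.Set.ofList, PySem.Set.add, PySem.Set.empty,
        PySem.Set.contains, List.filter_eq_nil_iff]
  constructor
  · rintro ⟨x, hx, hf⟩
    by_cases hxo : x = "read_only"
    · exact Or.inl (hxo ▸ hx)
    · exact Or.inr ((hf hxo) ▸ hx)
  · rintro (h | h)
    · exact ⟨_, h, fun hn => absurd rfl hn⟩
    · exact ⟨_, h, fun _ => rfl⟩

theorem exists_mem_eq (l : List String) (a : String) : (∃ t ∈ l, t = a) ↔ a ∈ l := by
  simp

theorem exists_mem_eq_or (l : List String) (a b : String) :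
    (∃ t ∈ l, t = a ∨ t = b) ↔ a ∈ l ∨ b ∈ l := by
  constructor
  · rintro ⟨t, ht, rfl | rfl⟩
    · exact Or.inl ht
    · exact Or.inr ht
  · rintro (h | h)
    · exact ⟨a, h, Or.inl rfl⟩
    · exact ⟨b, h, Or.inr rfl⟩

-- ===== VERDICT (by name: the statement is the Claim_ definition above) =====
theorem portal_seed_aliases_for_tool_py_spec : Claim_equal_portal_seed_aliases_for_tool_py := by
  intro tool tags systems _
  unfold Spec_portal_seed_aliases_for_tool_py
  unfold portal_seed_aliases_for_tool_py portal_seed_aliases_for_tool_py_alt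
  unfold READ_TAGS_py KEY_ACTIONS_py
  by_cases hj : "jira" ∈ systems
  · by_cases hR : ("read_only" ∈ tags ∨ "read" ∈ tags) <;>
    by_cases hc : "comment" ∈ tags <;> by_cases htr : "transition" ∈ tags <;>
    by_cases ha : "assign" ∈ tags <;> by_cases hu : "update" ∈ tags <;>
      simp only [PySem.Set.contains_iff, inter_read, mem_keysfold, getkey_char,
        PySem.Set.empty, List.not_mem_nil, false_or, List.foldl_cons, List.foldl_nil,
        String.reduceEq, and_true, and_false, or_false, false_and, or_self,
        exists_mem_eq_or, exists_mem_eq, hj, hR, hc, htr, ha, hu,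
        not_true, not_false_iff, if_true, if_false, ite_true, ite_false] <;> decide
  · simp only [PySem.Set.contains_iff, hj, not_false_iff, if_true, ite_true, ite_false]
    decide
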